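-- pv_equiv track=rewrite | github.com/SpyCooper/RSA-Encryption-and-Cracking | rsa_cracking.py | find_prime_numbers_in_range
-- ===== SOURCE A (Python) =====
-- def find_prime_numbers_in_range(n):
--     prime_numbers = []
--     for i in range(2, n):
--         if n % i == 0:
--             prime_numbers.append(i)
--             prime_numbers.append(n // i)
--             break
--     return prime_numbers
-- ===== SOURCE B (Python) =====
-- def find_prime_numbers_in_range(n):
--     # Trial division only up to sqrt(n): the smallest factor of a composite n
--     # never exceeds sqrt(n), so the answer is identical to the full scan.
--     i = 2
--     while i * i <= n:
--         if n % i == 0: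
--             return [i, n // i]
--         i += 1
--     return []
-- ===== Notes on version B (the rewrite author's own statement) =====
-- stated objective: faster
-- what changed: Replaces the scan over all candidates 2..n-1 by trial division that stops at sqrt(n), using that a composite n always has a factor at most sqrt(n).
import Mathlib
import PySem

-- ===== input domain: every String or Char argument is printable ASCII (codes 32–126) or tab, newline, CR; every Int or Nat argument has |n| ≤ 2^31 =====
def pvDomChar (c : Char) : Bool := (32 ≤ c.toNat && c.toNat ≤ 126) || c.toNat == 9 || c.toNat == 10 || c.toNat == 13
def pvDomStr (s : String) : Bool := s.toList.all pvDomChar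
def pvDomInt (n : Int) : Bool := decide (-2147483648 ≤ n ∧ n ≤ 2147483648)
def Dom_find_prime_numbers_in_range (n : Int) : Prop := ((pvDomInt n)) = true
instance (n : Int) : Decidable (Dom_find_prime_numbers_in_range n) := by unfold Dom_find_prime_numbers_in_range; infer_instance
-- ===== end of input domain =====

-- B replaces A's full scan over 2..n-1 by trial division stopping at sqrt(n) (asymptotically faster, same return value).


-- ===== PORT A =====
-- A's for-loop over range(2, n) with break: scan the range, stop at the first divisor.
def pvGoA (n : Int) : List Int → List Int
  | [] => []
  | i :: rest =>
      if PySem.Int.mod n i = 0 then [i, PySem.Int.floordiv n i] else pvGoA n rest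

def find_prime_numbers_in_range (n : Int) : List Int :=
  pvGoA n (PySem.List.pyRange 2 n 1)

-- ===== PORT B =====
-- B's while-loop: i*i ≤ n forces i ≤ n (used only for termination), so n+1-i decreases.
def pvGoB (n i : Int) : List Int :=
  if h : i * i ≤ n then
    if PySem.Int.mod n i = 0 then [i, PySem.Int.floordiv n i]
    else pvGoB n (i + 1)
  else []
termination_by (n + 1 - i).toNat
decreasing_by
  have hin : i ≤ n := by nlinarith [sq_nonneg i, sq_nonneg (i - 1)]
  omega

def find_prime_numbers_in_range_alt (n : Int) : List Int := pvGoB n 2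

-- ===== PRECONDITION & SPEC =====
def Spec_find_prime_numbers_in_range (n : Int) (out : List Int) : Prop := out = find_prime_numbers_in_range_alt n
instance (n : Int) (out : List Int) : Decidable (Spec_find_prime_numbers_in_range n out) := by unfold Spec_find_prime_numbers_in_range; infer_instance

-- ===== CLAIM (what is proved, stated in full; the proofs are below) =====
def Claim_equal_find_prime_numbers_in_range : Prop := ∀ (n : Int), Dom_find_prime_numbers_in_range n → Spec_find_prime_numbers_in_range n (find_prime_numbers_in_range n)

-- ===== LEMMAS AND PROOFS =====

-- the integer square root used by the proofs (not by either port)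
def pvS (n : Int) : Int := (Nat.sqrt n.toNat : Int)

theorem pvS_nonneg (n : Int) : 0 ≤ pvS n := by simp [pvS]

theorem pvS_le (n : Int) (hn : 0 ≤ n) : pvS n * pvS n ≤ n := by
  have h := Nat.sqrt_le' n.toNat
  rw [pow_two] at h
  simp only [pvS]
  rw [← Int.toNat_of_nonneg hn]
  exact_mod_cast h

theorem lt_pvS_succ (n : Int) : n < (pvS n + 1) * (pvS n + 1) := by
  have h := Nat.lt_succ_sqrt' n.toNat
  rw [pow_two, Nat.succ_eq_add_one] at h
  have h2 : ((n.toNat : Nat) : Int) < (((Nat.sqrt n.toNat + 1) * (Nat.sqrt n.toNat + 1) : Nat) : Int) := by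
    exact_mod_cast h
  push_cast at h2
  simp only [pvS]
  have h3 := Int.self_le_toNat n
  linarith

theorem le_pvS_iff (n i : Int) (hi : 0 ≤ i) (hn : 0 ≤ n) : i ≤ pvS n ↔ i * i ≤ n := by
  constructor
  · intro hle
    have h1 := pvS_le n hn
    have h2 := pvS_nonneg n
    nlinarith
  · intro hle
    have hnat : i.toNat * i.toNat ≤ n.toNat := by
      have : ((i.toNat * i.toNat : Nat) : Int) ≤ ((n.toNat : Nat) : Int) := by
        push_cast
        rw [Int.toNat_of_nonneg hi, Int.toNat_of_nonneg hn]
        exact hle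
      exact_mod_cast this
    have h := (Nat.le_sqrt' (m := i.toNat) (n := n.toNat)).mpr (by simpa [pow_two] using hnat)
    simp only [pvS]
    omega

theorem pvGoA_append_nil (n : Int) (L1 L2 : List Int) (h : pvGoA n L1 = []) :
    pvGoA n (L1 ++ L2) = pvGoA n L2 := by
  induction L1 with
  | nil => simp
  | cons a t ih =>
      simp only [pvGoA, List.cons_append] at h ⊢
      split at h
      · simp at h
      · simp_all

theorem pvGoA_append_ne (n : Int) (L1 L2 : List Int) (h : pvGoA n L1 ≠ []) :
    pvGoA n (L1 ++ L2) = pvGoA n L1 := by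
  induction L1 with
  | nil => simp [pvGoA] at h
  | cons a t ih =>
      simp only [pvGoA, List.cons_append] at h ⊢
      split at h
      · simp_all
      · simp_all

theorem pvGoA_nil_iff (n : Int) (L : List Int) :
    pvGoA n L = [] ↔ ∀ i ∈ L, ¬ PySem.Int.mod n i = 0 := by
  induction L with
  | nil => simp [pvGoA]
  | cons a t ih =>
      simp only [pvGoA, List.mem_cons]
      split
      · simp_all
      · simp_all

-- B's loop is A's scan restricted to the range [i, sqrt n + 1)
theorem pvGoB_eq_pvGoA (n i : Int) (hi : 2 ≤ i) :
    pvGoB n i = pvGoA n (PySem.List.pyRange i (pvS n + 1) 1) := by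
  rw [pvGoB]
  split
  · rename_i h
    have hn : 0 ≤ n := by nlinarith
    have hle : i ≤ pvS n := (le_pvS_iff n i (by omega) hn).mpr h
    rw [PySem.List.pyRange_one_cons (by omega)]
    simp only [pvGoA]
    split
    · rfl
    · exact pvGoB_eq_pvGoA n (i + 1) (by omega)
  · rename_i h
    have : pvS n + 1 ≤ i := by
      by_contra hc
      push Not at hc
      have hle : i ≤ pvS n := by omega
      by_cases hn : 0 ≤ n
      · exact h ((le_pvS_iff n i (by omega) hn).mp hle)
      · have := pvS_nonneg n
        -- n < 0 : pvS n = 0 from toNat, so i ≤ 0 contradicts 2 ≤ i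
        have h0 : pvS n = 0 := by
          simp only [pvS]
          have : n.toNat = 0 := by omega
          simp [this]
        omega
    rw [PySem.List.pyRange_one_eq_nil (by omega)]
    rfl
termination_by (n + 1 - i).toNat
decreasing_by
  have hin : i ≤ n := by nlinarith [sq_nonneg i, sq_nonneg (i - 1)]
  omega

-- no divisor above sqrt n and below n, given none in [2, sqrt n + 1)
theorem no_divisor_above (n : Int) (hn : 2 ≤ n)
    (hnil : pvGoA n (PySem.List.pyRange 2 (pvS n + 1) 1) = []) :
    pvGoA n (PySem.List.pyRange (pvS n + 1) n 1) = [] := by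
  rw [pvGoA_nil_iff] at hnil ⊢
  intro i hmem hdvd
  rw [PySem.List.mem_pyRange_one] at hmem
  obtain ⟨h1, h2⟩ := hmem
  have hs1 : 1 ≤ pvS n := by
    have := (le_pvS_iff n 1 (by omega) (by omega)).mpr (by omega)
    omega
  have hipos : (0:Int) < i := by omega
  have hidvd : i ∣ n := (PySem.Int.mod_eq_zero_iff_dvd n i).mp hdvd
  obtain ⟨d, hd⟩ := hidvd
  -- n = i * d ; i > sqrt n so i*i > n
  have hii : n < i * i := by
    have := lt_pvS_succ n
    nlinarith [pvS_nonneg n]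
  have hdlt : d < i := by nlinarith
  have hd2 : 2 ≤ d := by nlinarith
  have hdd : d * d < n := by nlinarith
  have hdle : d ≤ pvS n := (le_pvS_iff n d (by omega) (by omega)).mpr (by omega)
  have hdmem : d ∈ PySem.List.pyRange 2 (pvS n + 1) 1 := by
    rw [PySem.List.mem_pyRange_one]; omega
  have := hnil d hdmem
  apply this
  rw [PySem.Int.mod_eq_zero_iff_dvd]
  exact ⟨i, by linarith [hd, mul_comm i d]⟩

theorem main_eq (n : Int) : find_prime_numbers_in_range n = find_prime_numbers_in_range_alt n := by
  unfold find_prime_numbers_in_range find_prime_numbers_in_range_alt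
  rw [pvGoB_eq_pvGoA n 2 (by norm_num)]
  by_cases hn : n ≤ 1
  · rw [PySem.List.pyRange_one_eq_nil (by omega), PySem.List.pyRange_one_eq_nil]
    have : pvS n ≤ 1 := by
      by_cases h0 : 0 ≤ n
      · have := pvS_le n h0
        nlinarith [pvS_nonneg n]
      · simp only [pvS]
        have : n.toNat = 0 := by omega
        simp [this]
    omega
  · push Not at hn
    have hn2 : 2 ≤ n := by omega
    have hs1 : 1 ≤ pvS n := by
      have := (le_pvS_iff n 1 (by omega) (by omega)).mpr (by omega)
      omega
    have hsn : pvS n + 1 ≤ n := by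
      by_contra hc
      push Not at hc
      have := pvS_le n (by omega)
      nlinarith
    rw [PySem.List.pyRange_one_append 2 (pvS n + 1) n (by omega) hsn]
    by_cases hnil : pvGoA n (PySem.List.pyRange 2 (pvS n + 1) 1) = []
    · rw [pvGoA_append_nil n _ _ hnil, hnil, no_divisor_above n hn2 hnil]
    · exact pvGoA_append_ne n _ _ hnil

-- ===== VERDICT (by name: the statement is the Claim_ definition above) =====
theorem find_prime_numbers_in_range_spec : Claim_equal_find_prime_numbers_in_range := by
  intro n _
  unfold Spec_find_prime_numbers_in_range
  exact main_eq n
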